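-- pv_equiv track=rewrite | github.com/selaka-deemantha/university_assignments | K super/K_super.py | list_generator
-- ===== SOURCE A (Python) =====
-- def list_generator(m, n):
--     ans=[]
--     l=[str(m)]
--     for i in str(n):
--         l.append(i)
--     ans.append(int("".join(l)))
--     for i in range(len(str(n))):
--         a=l[i]
--         b=l[i+1]
--         l[i],l[i+1]=b,a
--         ans.append(int("".join(l)))
--     return ans
-- ===== SOURCE B (Python) =====
-- def list_generator(m, n):
--     s_n = str(n)
--     s_m = str(m)
--     return [int(s_n[:k] + s_m + s_n[k:]) for k in range(len(s_n) + 1)]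
-- ===== Notes on version B (the rewrite author's own statement) =====
-- stated objective: simpler
-- what changed: Replaces A's mutable token list and cumulative adjacent-swap loop by a single closed-form pass that inserts str(m) at every gap of str(n) via slicing.
import Mathlib
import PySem

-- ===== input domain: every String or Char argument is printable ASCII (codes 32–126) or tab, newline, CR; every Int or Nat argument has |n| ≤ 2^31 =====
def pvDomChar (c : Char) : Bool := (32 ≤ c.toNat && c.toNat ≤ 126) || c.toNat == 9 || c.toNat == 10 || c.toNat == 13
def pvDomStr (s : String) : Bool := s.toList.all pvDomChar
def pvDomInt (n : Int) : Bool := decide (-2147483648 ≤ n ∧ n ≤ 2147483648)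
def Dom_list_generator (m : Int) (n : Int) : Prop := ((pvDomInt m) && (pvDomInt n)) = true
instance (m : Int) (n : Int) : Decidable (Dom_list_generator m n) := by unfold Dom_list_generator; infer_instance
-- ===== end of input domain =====

-- B replaces A's adjacent-swap bubbling of str(m) through a mutable token list by a
-- closed-form 'insert str(m) at every gap of str(n)' slicing pass (objective: simpler).
-- Strings are ported on the List Char level (PySem.Chars), exact for str(int) digits.

-- ===== PORT A =====
-- int("".join(l)); under Pre_ (m, n ≥ 0) the parse always succeeds, getD 0 is never used.
def pvJoinInt (l : List (List Char)) : Int :=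
  (PySem.Int.ofChars? (PySem.Chars.join [] l)).getD 0

def list_generator (m : Int) (n : Int) : List Int :=
  -- l = [str(m)]; for i in str(n): l.append(i)
  let l0 : List (List Char) :=
    (PySem.Int.toChars n).foldl (fun l c => l ++ [[c]]) [PySem.Int.toChars m]
  -- ans.append(int("".join(l)))
  let ans0 : List Int := [pvJoinInt l0]
  -- for i in range(len(str(n))): swap l[i], l[i+1]; ans.append(int("".join(l)))
  let st := (PySem.List.pyRange 0 ((PySem.Int.toChars n).length : Int) 1).foldl
    (fun (st : List (List Char) × List Int) i =>
      let a := PySem.List.pyGetD st.1 i []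
      let b := PySem.List.pyGetD st.1 (i + 1) []
      let l' := PySem.List.pySetD (PySem.List.pySetD st.1 i b) (i + 1) a
      (l', st.2 ++ [pvJoinInt l']))
    (l0, ans0)
  st.2

-- ===== PORT B =====
def list_generator_alt (m : Int) (n : Int) : List Int :=
  let sn := PySem.Int.toChars n
  let sm := PySem.Int.toChars m
  (PySem.List.pyRange 0 ((sn.length : Int) + 1) 1).map (fun k =>
    (PySem.Int.ofChars? (PySem.List.slice sn none (some k) ++ sm ++ PySem.List.slice sn (some k) none)).getD 0)

-- ===== PRECONDITION & SPEC =====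
-- Excludes negative m or n: there str(·) carries a '-' that lands mid-string, so int() raises
-- ValueError in A (and in B).
def Pre_list_generator (m : Int) (n : Int) : Prop := 0 ≤ m ∧ 0 ≤ n
instance (m : Int) (n : Int) : Decidable (Pre_list_generator m n) := by unfold Pre_list_generator; infer_instance
def pvWitness_list_generator : Int × Int := (12, 345)

def Spec_list_generator (m : Int) (n : Int) (out : List Int) : Prop := out = list_generator_alt m n
instance (m : Int) (n : Int) (out : List Int) : Decidable (Spec_list_generator m n out) := by unfold Spec_list_generator; infer_instance

-- ===== CLAIM (what is proved, stated in full; the proofs are below) =====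
def Claim_equal_list_generator : Prop := ∀ (m : Int) (n : Int), Dom_list_generator m n → Pre_list_generator m n → Spec_list_generator m n (list_generator m n)

-- ===== LEMMAS AND PROOFS =====

-- the token list after k swaps: digits of the first k chars, then str(m), then the rest
def pvIns (sm sn : List Char) (k : Nat) : List (List Char) :=
  (sn.take k).map (fun c => [c]) ++ [sm] ++ (sn.drop k).map (fun c => [c])

-- the value appended at gap k
def pvG (sm sn : List Char) (k : Nat) : Int :=
  (PySem.Int.ofChars? (sn.take k ++ sm ++ sn.drop k)).getD 0

theorem pvJoin_nil_cons (x : List Char) (l : List (List Char)) :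
    PySem.Chars.join [] (x :: l) = x ++ PySem.Chars.join [] l := by
  cases l with
  | nil => simp [PySem.Chars.join_singleton, PySem.Chars.join_nil]
  | cons y ys => simp [PySem.Chars.join_cons_cons]

theorem pvJoin_nil_append (xs ys : List (List Char)) :
    PySem.Chars.join [] (xs ++ ys) = PySem.Chars.join [] xs ++ PySem.Chars.join [] ys := by
  induction xs with
  | nil => simp [PySem.Chars.join_nil]
  | cons x xs ih => simp [pvJoin_nil_cons, ih]

theorem pvJoin_singles (cs : List Char) :
    PySem.Chars.join [] (cs.map (fun c => [c])) = cs := by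
  induction cs with
  | nil => simp [PySem.Chars.join_nil]
  | cons c cs ih => simp [pvJoin_nil_cons, ih]

theorem pvJoin_ins (sm sn : List Char) (k : Nat) :
    PySem.Chars.join [] (pvIns sm sn k) = sn.take k ++ sm ++ sn.drop k := by
  unfold pvIns
  rw [pvJoin_nil_append, pvJoin_nil_append, pvJoin_singles, pvJoin_singles,
    PySem.Chars.join_singleton]

theorem pvJoinInt_ins (sm sn : List Char) (k : Nat) :
    pvJoinInt (pvIns sm sn k) = pvG sm sn k := by
  unfold pvJoinInt pvG; rw [pvJoin_ins]

theorem pv_foldl_append (sn : List Char) (acc : List (List Char)) :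
    sn.foldl (fun l c => l ++ [[c]]) acc = acc ++ sn.map (fun c => [c]) := by
  induction sn generalizing acc with
  | nil => simp
  | cons c cs ih => rw [List.foldl_cons, ih]; simp

theorem pv_l0_eq (sm : List Char) (sn : List Char) :
    sn.foldl (fun l c => l ++ [[c]]) [sm] = pvIns sm sn 0 := by
  unfold pvIns
  rw [pv_foldl_append]
  simp

theorem pv_getD1 (pre : List (List Char)) (x y : List Char) (rest : List (List Char)) :
    (pre ++ x :: y :: rest).getD pre.length [] = x := by
  simp [List.getD_eq_getElem?_getD]

theorem pv_getD2 (pre : List (List Char)) (x y : List Char) (rest : List (List Char)) :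
    (pre ++ x :: y :: rest).getD (pre.length + 1) [] = y := by
  simp [List.getD_eq_getElem?_getD]

theorem pv_setswap (pre : List (List Char)) (x y : List Char) (rest : List (List Char)) :
    ((pre ++ x :: y :: rest).set pre.length y).set (pre.length + 1) x = pre ++ y :: x :: rest := by
  rw [List.set_append_right _ _ (le_refl _), List.set_append_right _ _ (by omega)]
  simp

theorem pv_combo (pre : List (List Char)) (x y : List Char) (rest : List (List Char))
    (nn : Nat) (h : nn = pre.length) :
    ((pre ++ x :: y :: rest).set nn ((pre ++ x :: y :: rest).getD (nn + 1) [])).set (nn + 1)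
        ((pre ++ x :: y :: rest).getD nn [])
      = pre ++ y :: x :: rest := by
  subst h
  rw [pv_getD1, pv_getD2, pv_setswap]

-- swap of l[k], l[k+1] on the pvIns list advances it by one gap
theorem pv_swap (sm sn : List Char) (k : Nat) (hk : k < sn.length) :
    PySem.List.pySetD
      (PySem.List.pySetD (pvIns sm sn k) (k : Int)
        (PySem.List.pyGetD (pvIns sm sn k) ((k : Int) + 1) []))
      ((k : Int) + 1) (PySem.List.pyGetD (pvIns sm sn k) (k : Int) [])
    = pvIns sm sn (k + 1) := by
  obtain ⟨x, hdrop, htake⟩ :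
      ∃ x, sn.drop k = x :: sn.drop (k + 1) ∧ sn.take (k + 1) = sn.take k ++ [x] :=
    ⟨sn[k], List.drop_eq_getElem_cons hk, by rw [List.take_add_one]; simp [hk]⟩
  have hlen : ((sn.take k).map (fun c : Char => [c])).length = k := by
    simp [List.length_take]; omega
  have hIns : pvIns sm sn k
      = (sn.take k).map (fun c : Char => [c]) ++ sm :: [x] :: (sn.drop (k + 1)).map (fun c : Char => [c]) := by
    unfold pvIns; rw [hdrop]; simp
  have hcast : ((k : Int) + 1) = ((k + 1 : Nat) : Int) := by push_cast; ring
  rw [hIns, hcast, PySem.List.pyGetD_natCast, PySem.List.pyGetD_natCast,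
    PySem.List.pySetD_natCast, PySem.List.pySetD_natCast,
    pv_combo _ _ _ _ k hlen.symm]
  unfold pvIns
  rw [htake]
  simp

-- loop invariant of A's swap loop
theorem pv_loop (sm sn : List Char) (N : Nat) (hN : N ≤ sn.length) :
    (PySem.List.pyRange 0 (N : Int) 1).foldl
      (fun (st : List (List Char) × List Int) i =>
        let a := PySem.List.pyGetD st.1 i []
        let b := PySem.List.pyGetD st.1 (i + 1) []
        let l' := PySem.List.pySetD (PySem.List.pySetD st.1 i b) (i + 1) a
        (l', st.2 ++ [pvJoinInt l']))
      (pvIns sm sn 0, [pvG sm sn 0])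
    = (pvIns sm sn N, [pvG sm sn 0] ++ (List.range N).map (fun j => pvG sm sn (j + 1))) := by
  induction N with
  | zero => simp [PySem.List.pyRange_one_eq_nil]
  | succ N ih =>
    have hN' : N ≤ sn.length := by omega
    have hsplit : PySem.List.pyRange 0 ((N + 1 : Nat) : Int) 1
        = PySem.List.pyRange 0 (N : Int) 1 ++ [(N : Int)] := by
      have h : ((N + 1 : Nat) : Int) = (N : Int) + 1 := by push_cast; ring
      rw [h, PySem.List.pyRange_one_succ_right (by positivity)]
    rw [hsplit, List.foldl_append, ih hN']
    simp only [List.foldl_cons, List.foldl_nil]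
    rw [pv_swap sm sn N (by omega), pvJoinInt_ins]
    simp [List.range_succ]

theorem pvA_eq (m n : Int) :
    list_generator m n
    = [pvG (PySem.Int.toChars m) (PySem.Int.toChars n) 0]
      ++ (List.range (PySem.Int.toChars n).length).map
          (fun j => pvG (PySem.Int.toChars m) (PySem.Int.toChars n) (j + 1)) := by
  unfold list_generator
  dsimp only
  rw [pv_l0_eq, pvJoinInt_ins]
  rw [pv_loop _ _ _ (le_refl _)]

theorem pvB_eq (m n : Int) :
    list_generator_alt m n
    = (List.range ((PySem.Int.toChars n).length + 1)).map
        (fun k => pvG (PySem.Int.toChars m) (PySem.Int.toChars n) k) := by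
  unfold list_generator_alt
  dsimp only
  have hr : PySem.List.pyRange 0 (((PySem.Int.toChars n).length : Int) + 1) 1
      = (List.range ((PySem.Int.toChars n).length + 1)).map (fun k : Nat => (k : Int)) := by
    have h : ((PySem.Int.toChars n).length : Int) + 1 = (((PySem.Int.toChars n).length + 1 : Nat) : Int) := by
      push_cast; ring
    rw [h, PySem.List.pyRange_one]
    simp
  rw [hr, List.map_map]
  apply List.map_congr_left
  intro k _
  simp only [Function.comp]
  rw [PySem.List.slice_to_natCast, PySem.List.slice_from_natCast]
  unfold pvG
  simp [List.append_assoc]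

-- ===== VERDICT (by name: the statement is the Claim_ definition above) =====
theorem list_generator_spec : Claim_equal_list_generator := by
  intro m n _ _
  unfold Spec_list_generator
  rw [pvA_eq, pvB_eq, List.range_succ_eq_map]
  simp [List.map_map, Function.comp]
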